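-- pv_equiv track=rewrite | github.com/v9d0g/WebFind | utils/HandleFlie.py | handUrls
-- ===== SOURCE A (Python) =====
-- def handUrls(urls):
--     # 使用一个集合来存储去掉前缀后的URL
--     unique_urls = set()
--     res = []
--
--     for url in urls:
--         # 默认添加http://
--         if not url.startswith("http://") and not url.startswith("https://"):
--             url = "http://" + url
--         # 去掉前缀
--         if url.startswith("https://"):
--             url_no_prefix = url[8:]
--         elif url.startswith("http://"):
--             url_no_prefix = url[7:]
--         else:
--             url_no_prefix = url
--
--         # 如果这个去掉前缀后的URL不在集合中，则添加到结果中
--         if url_no_prefix not in unique_urls: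
--             unique_urls.add(url_no_prefix)
--             res.append(url)
--         # 如果这个去掉前缀后的URL已经在集合中，而且当前URL是http://前缀的，就跳过
--         elif url.startswith("http://"):
--             continue
--         # 如果这个去掉前缀后的URL已经在集合中，而且当前URL是https://前缀的，就替换掉之前的http://前缀的
--         elif url.startswith("https://"):
--             res = [
--                 u
--                 for u in res
--                 if not (u.startswith("http://") and u[7:] == url_no_prefix)
--             ]
--             res.append(url)
--
--     return res, len(res)
-- ===== SOURCE B (Python) =====
-- def _normalize(url):
--     # add default scheme, report (normalized url, is_https, scheme-stripped key)
--     if not url.startswith("http://") and not url.startswith("https://"):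
--         url = "http://" + url
--     if url.startswith("https://"):
--         return (url, True, url[8:])
--     return (url, False, url[7:])
--
--
-- def handUrls(urls):
--     norm = [_normalize(url) for url in urls]
--     # keys that occur with https anywhere in the input
--     https_keys = {k for (_, sec, k) in norm if sec}
--     res = []
--     seen_http = set()
--     for (url, sec, k) in norm:
--         if sec:
--             # every https url is emitted, in original order
--             res.append(url)
--         else:
--             if k not in https_keys and k not in seen_http:
--                 res.append(url)
--             seen_http.add(k)
--     return res, len(res)
-- ===== Notes on version B (the rewrite author's own statement) =====
-- stated objective: alternative
-- what changed: Replaces A's single pass that retroactively rebuilds the result list (deleting already-emitted http entries whenever a same-key https arrives) by two passes: first collect the set of keys that occur with https, then emit in order every https url and each first-seen http url whose key never occurs with https.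
import Mathlib
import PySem

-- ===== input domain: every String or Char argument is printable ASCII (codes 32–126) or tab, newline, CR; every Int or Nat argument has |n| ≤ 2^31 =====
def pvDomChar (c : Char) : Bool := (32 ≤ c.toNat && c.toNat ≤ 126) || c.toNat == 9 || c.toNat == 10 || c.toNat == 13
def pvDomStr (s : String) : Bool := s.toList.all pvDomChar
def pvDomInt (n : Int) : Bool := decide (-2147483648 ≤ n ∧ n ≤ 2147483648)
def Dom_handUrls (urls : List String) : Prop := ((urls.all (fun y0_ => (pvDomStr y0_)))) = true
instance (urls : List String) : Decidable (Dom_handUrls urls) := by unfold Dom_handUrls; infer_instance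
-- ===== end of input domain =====

-- B dedups by scheme-stripped key in two linear passes (https-key set first, then one ordered
-- emission pass) instead of A's in-loop rebuild of the result list; same return value, no side effects.

-- ===== PORT A =====
-- strings are handled at the code-point (List Char) level, as PySem does
def pvHttp : List Char := ['h','t','t','p',':','/','/']
def pvHttps : List Char := ['h','t','t','p','s',':','/','/']

def handUrlsStepA (st : PySem.Set (List Char) × List (List Char)) (url0 : List Char) :
    PySem.Set (List Char) × List (List Char) :=
  -- 默认添加http://
  let url := if !(PySem.Chars.startswith url0 pvHttp) && !(PySem.Chars.startswith url0 pvHttps)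
             then pvHttp ++ url0 else url0
  -- 去掉前缀
  let key := if PySem.Chars.startswith url pvHttps then PySem.List.slice url (some 8) none
             else if PySem.Chars.startswith url pvHttp then PySem.List.slice url (some 7) none
             else url
  if !(PySem.Set.contains st.1 key) then (PySem.Set.add st.1 key, st.2 ++ [url])
  else if PySem.Chars.startswith url pvHttp then st
  else if PySem.Chars.startswith url pvHttps then
    (st.1, (st.2.filter
      (fun u => !(PySem.Chars.startswith u pvHttp && (PySem.List.slice u (some 7) none == key)))) ++ [url])
  else st

def handUrls (urls : List String) : List String × Int :=
  let st := urls.foldl (fun st u => handUrlsStepA st u.toList) (PySem.Set.empty, [])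
  (st.2.map String.ofList, (st.2.length : Int))

-- ===== PORT B =====
def handUrlsNormB (url0 : List Char) : List Char × Bool × List Char :=
  let url := if !(PySem.Chars.startswith url0 pvHttp) && !(PySem.Chars.startswith url0 pvHttps)
             then pvHttp ++ url0 else url0
  if PySem.Chars.startswith url pvHttps then (url, true, PySem.List.slice url (some 8) none)
  else (url, false, PySem.List.slice url (some 7) none)

def handUrlsStepB (httpsKeys : PySem.Set (List Char))
    (st : List (List Char) × PySem.Set (List Char)) (t : List Char × Bool × List Char) :
    List (List Char) × PySem.Set (List Char) :=
  if t.2.1 then (st.1 ++ [t.1], st.2)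
  else if !(PySem.Set.contains httpsKeys t.2.2) && !(PySem.Set.contains st.2 t.2.2)
       then (st.1 ++ [t.1], PySem.Set.add st.2 t.2.2)
       else (st.1, PySem.Set.add st.2 t.2.2)

def handUrls_alt (urls : List String) : List String × Int :=
  let norm := urls.map (fun u => handUrlsNormB u.toList)
  let httpsKeys := PySem.Set.ofList ((norm.filter (fun t => t.2.1)).map (fun t => t.2.2))
  let st := norm.foldl (handUrlsStepB httpsKeys) ([], PySem.Set.empty)
  (st.1.map String.ofList, (st.1.length : Int))

-- ===== PRECONDITION & SPEC =====
def Spec_handUrls (urls : List String) (out : List String × Int) : Prop := out = handUrls_alt urls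
instance (urls : List String) (out : List String × Int) : Decidable (Spec_handUrls urls out) := by unfold Spec_handUrls; infer_instance

-- ===== CLAIM (what is proved, stated in full; the proofs are below) =====
def Claim_equal_handUrls : Prop := ∀ (urls : List String), Dom_handUrls urls → Spec_handUrls urls (handUrls urls)

-- ===== LEMMAS AND PROOFS =====
def pvNorm (u : List Char) : List Char :=
  if !(PySem.Chars.startswith u pvHttp) && !(PySem.Chars.startswith u pvHttps) then pvHttp ++ u else u
def pvSec (u : List Char) : Bool := PySem.Chars.startswith (pvNorm u) pvHttps
def pvKey (u : List Char) : List Char :=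
  if pvSec u then PySem.List.slice (pvNorm u) (some 8) none else PySem.List.slice (pvNorm u) (some 7) none

theorem not_http_of_https (u : List Char) (h : PySem.Chars.startswith u pvHttps = true) :
    PySem.Chars.startswith u pvHttp = false := by
  simp only [PySem.Chars.startswith, List.isPrefixOf_iff_prefix] at h
  obtain ⟨r, rfl⟩ := h
  simp [pvHttp, pvHttps, PySem.Chars.startswith, List.isPrefixOf]

theorem norm_http (u : List Char) (h : pvSec u = false) :
    PySem.Chars.startswith (pvNorm u) pvHttp = true ∧ pvNorm u = pvHttp ++ pvKey u := by
  have hs : PySem.Chars.startswith (pvNorm u) pvHttps = false := h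
  have h1 : PySem.Chars.startswith (pvNorm u) pvHttp = true := by
    unfold pvNorm at hs ⊢
    by_cases h2 : PySem.Chars.startswith u pvHttp
    · simp [h2]
    · by_cases h3 : PySem.Chars.startswith u pvHttps
      · simp [h2, h3] at hs
      · have h2' : List.isPrefixOf pvHttp u = false := by
          exact Bool.eq_false_iff.mpr h2
        have h3' : List.isPrefixOf pvHttps u = false := by
          exact Bool.eq_false_iff.mpr h3
        simp [h2', h3', PySem.Chars.startswith, List.isPrefixOf_iff_prefix]
  refine ⟨h1, ?_⟩
  obtain ⟨r, hr⟩ := List.isPrefixOf_iff_prefix.mp h1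
  rw [pvKey, if_neg (by simp [h]), PySem.List.slice_from _ (by norm_num), ← hr]
  simp [pvHttp]

theorem normB_eq (u : List Char) : handUrlsNormB u = (pvNorm u, pvSec u, pvKey u) := by
  unfold handUrlsNormB
  rw [show (if !(PySem.Chars.startswith u pvHttp) && !(PySem.Chars.startswith u pvHttps)
             then pvHttp ++ u else u) = pvNorm u from rfl]
  cases h : pvSec u
  · have h' : PySem.Chars.startswith (pvNorm u) pvHttps = false := h
    simp only [h', Bool.false_eq_true, if_false]
    simp [pvKey, h]
  · have h' : PySem.Chars.startswith (pvNorm u) pvHttps = true := h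
    simp only [h', if_true]
    simp [pvKey, h]

def pvKeyA (u : List Char) : List Char :=
  if PySem.Chars.startswith (pvNorm u) pvHttps then PySem.List.slice (pvNorm u) (some 8) none
  else if PySem.Chars.startswith (pvNorm u) pvHttp then PySem.List.slice (pvNorm u) (some 7) none
  else pvNorm u

theorem keyA_eq (u : List Char) : pvKeyA u = pvKey u := by
  unfold pvKeyA
  by_cases h : pvSec u
  · simp [pvKey, pvSec] at *
    simp [h]
  · have h' : pvSec u = false := Bool.eq_false_iff.mpr h
    have := norm_http u h'
    simp [pvKey, pvSec] at *
    simp [h', this.1]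

theorem stepA_eqn (st : PySem.Set (List Char) × List (List Char)) (u : List Char) :
    handUrlsStepA st u =
      (if !(PySem.Set.contains st.1 (pvKey u)) then (PySem.Set.add st.1 (pvKey u), st.2 ++ [pvNorm u])
       else if PySem.Chars.startswith (pvNorm u) pvHttp then st
       else if PySem.Chars.startswith (pvNorm u) pvHttps then
         (st.1, (st.2.filter
           (fun e => !(PySem.Chars.startswith e pvHttp && (PySem.List.slice e (some 7) none == pvKey u)))) ++ [pvNorm u])
       else st) := by
  have h : handUrlsStepA st u =
      (if !(PySem.Set.contains st.1 (pvKeyA u)) then (PySem.Set.add st.1 (pvKeyA u), st.2 ++ [pvNorm u])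
       else if PySem.Chars.startswith (pvNorm u) pvHttp then st
       else if PySem.Chars.startswith (pvNorm u) pvHttps then
         (st.1, (st.2.filter
           (fun e => !(PySem.Chars.startswith e pvHttp && (PySem.List.slice e (some 7) none == pvKeyA u)))) ++ [pvNorm u])
       else st) := rfl
  rw [h, keyA_eq]

theorem stepA_fst (st : PySem.Set (List Char) × List (List Char)) (u : List Char) :
    (handUrlsStepA st u).1 = PySem.Set.add st.1 (pvKey u) := by
  rw [stepA_eqn]
  by_cases hc : PySem.Set.contains st.1 (pvKey u)
  · have hadd : PySem.Set.add st.1 (pvKey u) = st.1 := by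
      unfold PySem.Set.add; rw [hc]; simp
    rw [hadd]
    simp only [hc, Bool.not_true, Bool.false_eq_true, if_false]
    split
    · rfl
    · split <;> rfl
  · simp at hc; simp [hc]

def pvBF (H : PySem.Set (List Char)) (p : List (List Char))
    (st : List (List Char) × PySem.Set (List Char)) : List (List Char) × PySem.Set (List Char) :=
  p.foldl (fun s u => handUrlsStepB H s (handUrlsNormB u)) st

def pvPred (k : List Char) (e : List Char) : Bool :=
  !(PySem.Chars.startswith e pvHttp && (PySem.List.slice e (some 7) none == k))

theorem bstep_eqn (H : PySem.Set (List Char)) (st : List (List Char) × PySem.Set (List Char))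
    (u : List Char) :
    handUrlsStepB H st (handUrlsNormB u) =
      if pvSec u then (st.1 ++ [pvNorm u], st.2)
      else if !(PySem.Set.contains H (pvKey u)) && !(PySem.Set.contains st.2 (pvKey u))
           then (st.1 ++ [pvNorm u], PySem.Set.add st.2 (pvKey u))
           else (st.1, PySem.Set.add st.2 (pvKey u)) := by
  rw [normB_eq]; rfl

theorem BF_acc (H : PySem.Set (List Char)) (p : List (List Char)) (acc : List (List Char))
    (S : PySem.Set (List Char)) :
    pvBF H p (acc, S) = (acc ++ (pvBF H p ([], S)).1, (pvBF H p ([], S)).2) := by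
  induction p generalizing acc S with
  | nil => simp [pvBF]
  | cons u p ih =>
    simp only [pvBF, List.foldl_cons]
    rw [bstep_eqn, bstep_eqn]
    by_cases hsec : pvSec u
    · simp only [hsec, if_true]
      show pvBF H p (acc ++ [pvNorm u], S) =
        (acc ++ (pvBF H p ([] ++ [pvNorm u], S)).1, (pvBF H p ([] ++ [pvNorm u], S)).2)
      rw [ih, ih ([] ++ [pvNorm u])]
      simp
    · simp only [hsec, Bool.false_eq_true, if_false]
      by_cases hc : (!PySem.Set.contains H (pvKey u) && !PySem.Set.contains S (pvKey u)) = true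
      · simp only [hc, if_true]
        show pvBF H p (acc ++ [pvNorm u], PySem.Set.add S (pvKey u)) =
          (acc ++ (pvBF H p ([] ++ [pvNorm u], PySem.Set.add S (pvKey u))).1,
           (pvBF H p ([] ++ [pvNorm u], PySem.Set.add S (pvKey u))).2)
        rw [ih, ih ([] ++ [pvNorm u])]
        simp
      · simp only [hc]
        show pvBF H p (acc, PySem.Set.add S (pvKey u)) =
          (acc ++ (pvBF H p ([], PySem.Set.add S (pvKey u))).1,
           (pvBF H p ([], PySem.Set.add S (pvKey u))).2)
        rw [ih]

theorem BF_snd (H : PySem.Set (List Char)) (p : List (List Char)) (acc : List (List Char))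
    (S : PySem.Set (List Char)) :
    (pvBF H p (acc, S)).2
      = (p.filter (fun u => !pvSec u)).foldl (fun s u => PySem.Set.add s (pvKey u)) S := by
  induction p generalizing acc S with
  | nil => simp [pvBF]
  | cons u p ih =>
    simp only [pvBF, List.foldl_cons]
    rw [bstep_eqn]
    by_cases hsec : pvSec u
    · simp only [hsec, if_true]
      show (pvBF H p (acc ++ [pvNorm u], S)).2 = _
      rw [ih]
      simp [hsec]
    · have hsec' : pvSec u = false := Bool.eq_false_iff.mpr hsec
      simp only [hsec', Bool.false_eq_true, if_false]
      by_cases hc : (!PySem.Set.contains H (pvKey u) && !PySem.Set.contains S (pvKey u)) = true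
      · simp only [hc, if_true]
        show (pvBF H p (acc ++ [pvNorm u], PySem.Set.add S (pvKey u))).2 = _
        rw [ih]
        simp [hsec']
      · simp only [hc]
        show (pvBF H p (acc, PySem.Set.add S (pvKey u))).2 = _
        rw [ih]
        simp [hsec']

theorem BF_entries (p : List (List Char)) (H : PySem.Set (List Char)) (S : PySem.Set (List Char))
    (e : List Char) (he : e ∈ (pvBF H p ([], S)).1)
    (hh : PySem.Chars.startswith e pvHttp = true) :
    ∃ v ∈ p, pvSec v = false ∧ e = pvNorm v := by
  induction p generalizing S with
  | nil => simp [pvBF] at he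
  | cons u p ih =>
    simp only [pvBF, List.foldl_cons] at he
    rw [bstep_eqn] at he
    by_cases hsec : pvSec u
    · simp only [hsec, if_true] at he
      replace he : e ∈ (pvBF H p ([] ++ [pvNorm u], S)).1 := he
      rw [BF_acc] at he
      simp at he
      rcases he with he | he
      · exact absurd hh (by rw [he]; simp [not_http_of_https _ hsec])
      · obtain ⟨v, hv, h1, h2⟩ := ih S (by rw [BF_acc]; simp [he])
        exact ⟨v, by simp [hv], h1, h2⟩
    · have hsec' : pvSec u = false := Bool.eq_false_iff.mpr hsec
      simp only [hsec', Bool.false_eq_true, if_false] at he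
      by_cases hc : (!PySem.Set.contains H (pvKey u) && !PySem.Set.contains S (pvKey u)) = true
      · simp only [hc, if_true] at he
        replace he : e ∈ (pvBF H p ([] ++ [pvNorm u], PySem.Set.add S (pvKey u))).1 := he
        rw [BF_acc] at he
        simp at he
        rcases he with he | he
        · exact ⟨u, by simp, hsec', he⟩
        · obtain ⟨v, hv, h1, h2⟩ := ih _ he
          exact ⟨v, by simp [hv], h1, h2⟩
      · simp only [hc] at he
        replace he : e ∈ (pvBF H p ([], PySem.Set.add S (pvKey u))).1 := he
        obtain ⟨v, hv, h1, h2⟩ := ih _ he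
        exact ⟨v, by simp [hv], h1, h2⟩

theorem slice7_http (k : List Char) : PySem.List.slice (pvHttp ++ k) (some 7) none = k := by
  rw [PySem.List.slice_from _ (by norm_num)]
  simp [pvHttp]

theorem pred_sec (k u : List Char) (hsec : pvSec u = true) : pvPred k (pvNorm u) = true := by
  simp [pvPred, not_http_of_https _ hsec]

theorem pred_http (k u : List Char) (hsec : pvSec u = false) :
    pvPred k (pvNorm u) = !(pvKey u == k) := by
  obtain ⟨h1, h2⟩ := norm_http u hsec
  rw [pvPred, h1]
  conv_lhs => rw [h2]
  rw [slice7_http]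
  simp

theorem contains_iff (s : PySem.Set (List Char)) (x : List Char) :
    PySem.Set.contains s x = true ↔ x ∈ s := List.contains_iff_mem

theorem BF_filter (p : List (List Char)) (H : PySem.Set (List Char)) (k : List Char)
    (S : PySem.Set (List Char)) :
    (pvBF (PySem.Set.add H k) p ([], S)).1 = ((pvBF H p ([], S)).1).filter (pvPred k) := by
  induction p generalizing S with
  | nil => simp [pvBF]
  | cons u p ih =>
    simp only [pvBF, List.foldl_cons]
    rw [bstep_eqn, bstep_eqn]
    by_cases hsec : pvSec u
    · simp only [hsec, if_true]
      show (pvBF (PySem.Set.add H k) p ([] ++ [pvNorm u], S)).1 =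
        ((pvBF H p ([] ++ [pvNorm u], S)).1).filter (pvPred k)
      rw [BF_acc (PySem.Set.add H k) p ([] ++ [pvNorm u]) S, BF_acc H p ([] ++ [pvNorm u]) S]
      simp [pred_sec k u hsec, ih]
    · have hsec' : pvSec u = false := Bool.eq_false_iff.mpr hsec
      simp only [hsec', Bool.false_eq_true, if_false]
      by_cases hj : pvKey u = k
      · have hcA : (!PySem.Set.contains (PySem.Set.add H k) (pvKey u)
            && !PySem.Set.contains S (pvKey u)) = false := by
          have h1 : PySem.Set.contains (PySem.Set.add H k) (pvKey u) = true := by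
            rw [contains_iff, PySem.Set.mem_add]
            exact Or.inr hj
          rw [h1]; rfl
        rw [hcA]
        simp only [Bool.false_eq_true, if_false]
        by_cases hcB : (!PySem.Set.contains H (pvKey u) && !PySem.Set.contains S (pvKey u)) = true
        · rw [hcB]
          simp only [if_true]
          show (pvBF (PySem.Set.add H k) p ([], PySem.Set.add S (pvKey u))).1 =
            ((pvBF H p ([] ++ [pvNorm u], PySem.Set.add S (pvKey u))).1).filter (pvPred k)
          rw [BF_acc H p ([] ++ [pvNorm u]) (PySem.Set.add S (pvKey u))]
          simp [pred_http k u hsec', hj, ih]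
        · rw [Bool.eq_false_iff.mpr hcB]
          simp only [Bool.false_eq_true, if_false]
          exact ih _
      · have same : PySem.Set.contains (PySem.Set.add H k) (pvKey u)
            = PySem.Set.contains H (pvKey u) := by
          rcases hcb : PySem.Set.contains H (pvKey u) with _ | _
          · rw [Bool.eq_false_iff]
            intro hm
            rw [contains_iff, PySem.Set.mem_add] at hm
            rcases hm with hm | hm
            · have := (contains_iff H (pvKey u)).mpr hm
              rw [hcb] at this; exact Bool.false_ne_true this
            · exact hj hm
          · rw [contains_iff, PySem.Set.mem_add]
            exact Or.inl (by rw [← contains_iff]; exact hcb)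
        rw [same]
        by_cases hc : (!PySem.Set.contains H (pvKey u) && !PySem.Set.contains S (pvKey u)) = true
        · rw [hc]
          simp only [if_true]
          show (pvBF (PySem.Set.add H k) p ([] ++ [pvNorm u], PySem.Set.add S (pvKey u))).1 =
            ((pvBF H p ([] ++ [pvNorm u], PySem.Set.add S (pvKey u))).1).filter (pvPred k)
          rw [BF_acc (PySem.Set.add H k) p ([] ++ [pvNorm u]) (PySem.Set.add S (pvKey u)),
              BF_acc H p ([] ++ [pvNorm u]) (PySem.Set.add S (pvKey u))]
          simp [pred_http k u hsec', hj, ih]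
        · rw [Bool.eq_false_iff.mpr hc]
          simp only [Bool.false_eq_true, if_false]
          exact ih _

def pvAF (p : List (List Char)) : PySem.Set (List Char) × List (List Char) :=
  p.foldl handUrlsStepA (PySem.Set.empty, [])
def pvHK (p : List (List Char)) : PySem.Set (List Char) :=
  PySem.Set.ofList ((p.filter pvSec).map pvKey)

theorem AF_aux (p : List (List Char)) (st : PySem.Set (List Char) × List (List Char)) :
    (p.foldl handUrlsStepA st).1 = p.foldl (fun s u => PySem.Set.add s (pvKey u)) st.1 := by
  induction p generalizing st with
  | nil => rfl
  | cons u p ih => simp only [List.foldl_cons]; rw [ih, stepA_fst]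

theorem AF_fst (p : List (List Char)) : (pvAF p).1 = PySem.Set.ofList (p.map pvKey) := by
  rw [pvAF, AF_aux, PySem.Set.ofList_eq_foldl, List.foldl_map]
  rfl

theorem mem_HK (p : List (List Char)) (x : List Char) :
    x ∈ pvHK p ↔ ∃ v ∈ p, pvSec v = true ∧ pvKey v = x := by
  simp [pvHK, PySem.Set.mem_ofList, List.mem_map, List.mem_filter]
  tauto

theorem mem_Seen (p : List (List Char)) (x : List Char) :
    x ∈ (p.filter (fun u => !pvSec u)).foldl (fun s u => PySem.Set.add s (pvKey u)) PySem.Set.empty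
      ↔ ∃ v ∈ p, pvSec v = false ∧ pvKey v = x := by
  have h : (p.filter (fun u => !pvSec u)).foldl (fun s u => PySem.Set.add s (pvKey u)) PySem.Set.empty
      = PySem.Set.ofList ((p.filter (fun u => !pvSec u)).map pvKey) := by
    rw [PySem.Set.ofList_eq_foldl, List.foldl_map]; rfl
  rw [h]
  simp [PySem.Set.mem_ofList, List.mem_map, List.mem_filter]
  tauto

theorem HK_snoc (p : List (List Char)) (u : List Char) :
    pvHK (p ++ [u]) = if pvSec u then PySem.Set.add (pvHK p) (pvKey u) else pvHK p := by
  rw [pvHK, List.filter_append, List.map_append, PySem.Set.ofList_eq_foldl, List.foldl_append]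
  cases hsec : pvSec u
  · simp [hsec, pvHK, PySem.Set.ofList_eq_foldl]
  · simp [hsec, pvHK, PySem.Set.ofList_eq_foldl]

theorem main_eq (p : List (List Char)) :
    (pvAF p).2 = (pvBF (pvHK p) p ([], PySem.Set.empty)).1 := by
  induction p using List.reverseRecOn with
  | nil => rfl
  | append_singleton p u ih =>
    have hA : pvAF (p ++ [u]) = handUrlsStepA (pvAF p) u := by
      simp [pvAF, List.foldl_append]
    have hB : ∀ H, pvBF H (p ++ [u]) ([], PySem.Set.empty)
        = handUrlsStepB H (pvBF H p ([], PySem.Set.empty)) (handUrlsNormB u) := by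
      intro H; simp [pvBF, List.foldl_append]
    rw [hA, stepA_eqn, HK_snoc, hB]
    rw [bstep_eqn]
    cases hsec : pvSec u
    · simp only [Bool.false_eq_true, if_false]
      by_cases hk : pvKey u ∈ p.map pvKey
      · have hcA : PySem.Set.contains (pvAF p).1 (pvKey u) = true := by
          rw [contains_iff, AF_fst, PySem.Set.mem_ofList]; exact hk
        have hcB : (!PySem.Set.contains (pvHK p) (pvKey u)
            && !PySem.Set.contains (pvBF (pvHK p) p ([], PySem.Set.empty)).2 (pvKey u)) = false := by
          obtain ⟨v, hv, hkv⟩ := List.mem_map.mp hk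
          rcases hvs : pvSec v
          · have : pvKey u ∈ (pvBF (pvHK p) p ([], PySem.Set.empty)).2 := by
              rw [BF_snd, mem_Seen]; exact ⟨v, hv, hvs, hkv⟩
            rw [(contains_iff _ _).mpr this]; simp
          · have : pvKey u ∈ pvHK p := by rw [mem_HK]; exact ⟨v, hv, hvs, hkv⟩
            rw [(contains_iff _ _).mpr this]; simp
        rw [hcA, hcB]
        simp only [Bool.not_true, Bool.false_eq_true, if_false]
        rw [(norm_http u hsec).1]
        simp only [if_true]
        exact ih
      · have hcA : PySem.Set.contains (pvAF p).1 (pvKey u) = false := by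
          rw [Bool.eq_false_iff]
          intro hm
          rw [contains_iff, AF_fst, PySem.Set.mem_ofList] at hm
          exact hk hm
        have hcB : (!PySem.Set.contains (pvHK p) (pvKey u)
            && !PySem.Set.contains (pvBF (pvHK p) p ([], PySem.Set.empty)).2 (pvKey u)) = true := by
          have h1 : PySem.Set.contains (pvHK p) (pvKey u) = false := by
            rw [Bool.eq_false_iff]
            intro hm
            rw [contains_iff, mem_HK] at hm
            obtain ⟨v, hv, _, hkv⟩ := hm
            exact hk (List.mem_map.mpr ⟨v, hv, hkv⟩)
          have h2 : PySem.Set.contains (pvBF (pvHK p) p ([], PySem.Set.empty)).2 (pvKey u) = false := by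
            rw [Bool.eq_false_iff]
            intro hm
            rw [contains_iff, BF_snd, mem_Seen] at hm
            obtain ⟨v, hv, _, hkv⟩ := hm
            exact hk (List.mem_map.mpr ⟨v, hv, hkv⟩)
          rw [h1, h2]; rfl
        rw [hcA, hcB]
        simp only [Bool.not_false, if_true]
        rw [ih]
    · simp only [if_true]
      rw [BF_filter]
      by_cases hk : pvKey u ∈ p.map pvKey
      · have hcA : PySem.Set.contains (pvAF p).1 (pvKey u) = true := by
          rw [contains_iff, AF_fst, PySem.Set.mem_ofList]; exact hk
        rw [hcA]
        simp only [Bool.not_true, Bool.false_eq_true, if_false]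
        rw [not_http_of_https _ hsec,
            show PySem.Chars.startswith (pvNorm u) pvHttps = true from hsec]
        simp only [Bool.false_eq_true, if_false, if_true]
        rw [ih]
        rfl
      · have hcA : PySem.Set.contains (pvAF p).1 (pvKey u) = false := by
          rw [Bool.eq_false_iff]
          intro hm
          rw [contains_iff, AF_fst, PySem.Set.mem_ofList] at hm
          exact hk hm
        rw [hcA]
        simp only [Bool.not_false, if_true]
        have hfil : List.filter (pvPred (pvKey u)) (pvBF (pvHK p) p ([], PySem.Set.empty)).1
            = (pvBF (pvHK p) p ([], PySem.Set.empty)).1 := by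
          apply List.filter_eq_self.mpr
          intro e he
          rcases hhe : PySem.Chars.startswith e pvHttp
          · simp [pvPred, hhe]
          · obtain ⟨v, hv, hvs, hev⟩ := BF_entries p (pvHK p) PySem.Set.empty e he hhe
            have : pvKey v ≠ pvKey u := fun hEq => hk (List.mem_map.mpr ⟨v, hv, hEq⟩)
            rw [hev, pred_http _ _ hvs]
            simp [this]
        rw [hfil, ih]

theorem final (urls : List String) : handUrls urls = handUrls_alt urls := by
  simp only [handUrls, handUrls_alt]
  have hq : urls.foldl (fun st u => handUrlsStepA st u.toList) (PySem.Set.empty, [])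
      = pvAF (urls.map String.toList) := by
    rw [pvAF, List.foldl_map]
  have hHK : PySem.Set.ofList
      (((urls.map (fun u => handUrlsNormB u.toList)).filter (fun t => t.2.1)).map (fun t => t.2.2))
      = pvHK (urls.map String.toList) := by
    rw [List.filter_map, List.map_map, pvHK]
    congr 1
    rw [List.filter_map, List.map_map]
    congr 1
    · funext u; simp [Function.comp, normB_eq]
    · congr 1; funext u; simp [Function.comp, normB_eq]
  have hBF : ∀ H, (urls.map (fun u => handUrlsNormB u.toList)).foldl (handUrlsStepB H) ([], PySem.Set.empty)
      = pvBF H (urls.map String.toList) ([], PySem.Set.empty) := by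
    intro H
    rw [List.foldl_map, pvBF, List.foldl_map]
  rw [hq, hHK, hBF, main_eq]

-- ===== VERDICT (by name: the statement is the Claim_ definition above) =====
theorem handUrls_spec : Claim_equal_handUrls := by
  intro urls _
  exact final urls
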